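-- pv_equiv track=rewrite | github.com/Yueleng/ccc_cco_material | prev_exams_and_ans/2005ccc/q2_rsa_number/rsa_number.py | is_rsa
-- ===== SOURCE A (Python) =====
-- import math
--
-- def is_rsa(num):
--     cnt = 0
--     for i in range(1, int(math.sqrt(num)) + 1):
--         if num % i == 0 and i * i != num:
--             cnt += 2
--         elif i * i == num:
--             cnt += 1
--
--     return cnt == 4
-- ===== SOURCE B (Python) =====
-- import math
--
-- def is_rsa(num):
--     # count divisors via prime factorization by trial division: tau = prod(e_i + 1)
--     if num <= 1:
--         return False
--     n = num
--     divcount = 1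
--     p = 2
--     while p * p <= n:
--         if n % p == 0:
--             e = 0
--             while n % p == 0:
--                 n //= p
--                 e += 1
--             divcount *= e + 1
--         p += 1
--     if n > 1:
--         divcount *= 2
--     return divcount == 4
-- ===== Notes on version B (the rewrite author's own statement) =====
-- stated objective: faster
-- what changed: A counts divisor pairs with a full scan of 1..isqrt(n); B computes the prime factorization by trial division, dividing each found factor out, and checks that the divisor count prod(e_i+1) equals 4.
-- crash fix: On negative num A raises ValueError (math.sqrt of a negative); B returns False there. — e.g. on is_rsa(-5): A raises ValueError, B returns false
import Mathlib
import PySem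

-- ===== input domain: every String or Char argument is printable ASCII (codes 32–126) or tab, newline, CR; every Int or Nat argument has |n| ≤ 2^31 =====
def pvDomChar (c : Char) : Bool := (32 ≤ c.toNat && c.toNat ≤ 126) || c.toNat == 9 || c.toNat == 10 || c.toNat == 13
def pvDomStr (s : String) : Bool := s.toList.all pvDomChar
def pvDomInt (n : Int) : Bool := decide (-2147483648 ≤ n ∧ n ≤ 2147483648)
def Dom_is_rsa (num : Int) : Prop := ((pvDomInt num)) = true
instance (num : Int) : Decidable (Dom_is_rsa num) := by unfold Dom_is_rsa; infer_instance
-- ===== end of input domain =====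

-- B replaces A's full divisor-pair scan of 1..isqrt(num) by trial-division prime factorization
-- (divisor count = product of (exponent+1)); proved equal on num ≥ 0 (A raises ValueError below 0).

-- ===== PORT A =====
-- int(math.sqrt(num)) is ported as Nat.sqrt: for 0 ≤ num ≤ 2^31 the correctly rounded double
-- sqrt truncates to exactly the integer square root, so this is exact on Dom ∩ Pre_.
def is_rsa (num : Int) : Bool :=
  let cnt : Int :=
    (PySem.List.pyRange 1 ((Nat.sqrt num.toNat : Int) + 1) 1).foldl
      (fun cnt i =>
        if PySem.Int.mod num i == 0 && i * i != num then cnt + 2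
        else if i * i == num then cnt + 1
        else cnt) 0
  cnt == 4

-- ===== PORT B =====
-- inner while of Source B: divide p out of n counting the multiplicity; returns (n with p removed, exponent).
-- (the 2 ≤ p / 0 < n guards only make the recursion total; they hold at every call site)
def stripF (n p : Nat) : Nat × Nat :=
  if h : 2 ≤ p ∧ 0 < n ∧ n % p = 0 then
    let r := stripF (n / p) p
    (r.1, r.2 + 1)
  else (n, 0)
termination_by n
decreasing_by exact Nat.div_lt_self h.2.1 (by omega)

-- needed by bLoop's termination argument
theorem stripF_fst_le (n p : Nat) : (stripF n p).1 ≤ n := by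
  induction n using stripF.induct (p := p) with
  | case1 n h ih =>
      rw [stripF, dif_pos h]
      exact le_trans ih (Nat.div_le_self _ _)
  | case2 n h => rw [stripF, dif_neg h]

theorem stripF_fst_lt {n p : Nat} (hp : 2 ≤ p) (hn : 0 < n) (hd : n % p = 0) :
    (stripF n p).1 < n := by
  rw [stripF, dif_pos ⟨hp, hn, hd⟩]
  exact lt_of_le_of_lt (stripF_fst_le _ _) (Nat.div_lt_self hn (by omega))

-- outer while of Source B over candidate factors p; returns (remaining n, divisor count so far)
def bLoop (n p acc : Nat) : Nat × Nat :=
  if h : p * p ≤ n ∧ 2 ≤ p then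
    if hd : n % p = 0 then
      let r := stripF n p
      bLoop r.1 (p + 1) (acc * (r.2 + 1))
    else bLoop n (p + 1) acc
  else (n, acc)
termination_by n - p
decreasing_by
  · have h2 : 2 * p ≤ p * p := Nat.mul_le_mul_right p h.2
    have := stripF_fst_lt h.2 (by omega) hd
    omega
  · have h2 : 2 * p ≤ p * p := Nat.mul_le_mul_right p h.2
    omega

def is_rsa_alt (num : Int) : Bool :=
  if num ≤ 1 then false
  else
    let r := bLoop num.toNat 2 1
    let dc := if r.1 > 1 then r.2 * 2 else r.2
    dc == 4

-- ===== PRECONDITION & SPEC =====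
-- Pre_ excludes exactly the negative inputs, on which Python A raises ValueError (math.sqrt of a negative).
def Pre_is_rsa (num : Int) : Prop := 0 ≤ num
instance (num : Int) : Decidable (Pre_is_rsa num) := by unfold Pre_is_rsa; infer_instance
def pvWitness_is_rsa : Int := (21)

-- On negative num A raises ValueError (math.sqrt of a negative); B returns False there.
def Raises_is_rsa (num : Int) : Prop := num < 0
instance (num : Int) : Decidable (Raises_is_rsa num) := by unfold Raises_is_rsa; infer_instance
def pvRaiseWitness_is_rsa : Int := (-5)
def pvRaiseWitnessOut_is_rsa : Bool := false

def Spec_is_rsa (num : Int) (out : Bool) : Prop := out = is_rsa_alt num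
instance (num : Int) (out : Bool) : Decidable (Spec_is_rsa num out) := by unfold Spec_is_rsa; infer_instance

-- ===== CLAIM (what is proved, stated in full; the proofs are below) =====
def Claim_equal_is_rsa : Prop := ∀ (num : Int), Dom_is_rsa num → Pre_is_rsa num → Spec_is_rsa num (is_rsa num)
def Claim_raises_is_rsa : Prop := (∀ (num : Int), Dom_is_rsa num → Raises_is_rsa num → ¬ Pre_is_rsa num) ∧ (Dom_is_rsa (pvRaiseWitness_is_rsa) ∧ Raises_is_rsa (pvRaiseWitness_is_rsa) ∧ is_rsa_alt (pvRaiseWitness_is_rsa) = pvRaiseWitnessOut_is_rsa)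

-- ===== LEMMAS AND PROOFS =====

-- === A-side: the pair-counting loop computes the divisor count ===

-- the Nat-valued weight A's loop adds at index i
def tA (n i : Nat) : Nat := if n % i = 0 ∧ i * i ≠ n then 2 else if i * i = n then 1 else 0

theorem tA_eq (n i : Nat) :
    tA n i = if i ∣ n then (if i * i = n then 1 else 2) else 0 := by
  unfold tA
  by_cases hd : i ∣ n
  · have hm : n % i = 0 := Nat.dvd_iff_mod_eq_zero.mp hd
    by_cases hsq : i * i = n <;> simp [hm, hd, hsq]
  · have hm : ¬ n % i = 0 := fun h => hd (Nat.dvd_iff_mod_eq_zero.mpr h)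
    have hsq : ¬ i * i = n := fun h => hd ⟨i, h.symm⟩
    simp [hm, hd, hsq]

theorem body_eq (n k : Nat) (cnt : Int) :
    (if PySem.Int.mod (n : Int) (1 + (k:Int)) == 0 && (1 + (k:Int)) * (1 + (k:Int)) != (n : Int) then cnt + 2
      else if (1 + (k:Int)) * (1 + (k:Int)) == (n : Int) then cnt + 1
      else cnt)
      = cnt + ((tA n (1 + k) : Nat) : Int) := by
  have hc : (1 + (k:Int)) = ((1 + k : Nat) : Int) := by push_cast; ring
  rw [hc, PySem.Int.mod_natCast, ← Nat.cast_mul]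
  unfold tA
  by_cases h1 : n % (1 + k) = 0 <;> by_cases h2 : (1 + k) * (1 + k) = n
  · simp [h1, h2]
  · simp [h1, h2]
    intro h; exact absurd (by exact_mod_cast h) h2
  · exact absurd (Nat.dvd_iff_mod_eq_zero.mp ⟨1 + k, h2.symm⟩) h1
  · have hnd : ¬ ((1 + (k:Int)) ∣ (n:Int)) := by
      rw [hc, Int.natCast_dvd_natCast]
      exact fun hd => h1 (Nat.dvd_iff_mod_eq_zero.mp hd)
    have hne : ¬ ((1 + (k:Int)) * (1 + (k:Int)) = (n:Int)) := fun h => h2 (by exact_mod_cast h)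
    simp [h1, h2, hnd, hne]

theorem A_cnt_eq_sum (n : Nat) :
    (PySem.List.pyRange 1 ((Nat.sqrt n : Int) + 1) 1).foldl
      (fun cnt i =>
        if PySem.Int.mod (n : Int) i == 0 && i * i != (n : Int) then cnt + 2
        else if i * i == (n : Int) then cnt + 1
        else cnt) 0
    = (((Finset.Icc 1 (Nat.sqrt n)).sum (tA n) : Nat) : Int) := by
  rw [PySem.List.pyRange_one]
  have h1 : ((Nat.sqrt n : Int) + 1 - 1).toNat = Nat.sqrt n := by omega
  rw [h1, List.foldl_map]
  have h2 : (fun (cnt : Int) (k : Nat) =>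
      if PySem.Int.mod (n : Int) (1 + (k:Int)) == 0 && (1 + (k:Int)) * (1 + (k:Int)) != (n : Int) then cnt + 2
      else if (1 + (k:Int)) * (1 + (k:Int)) == (n : Int) then cnt + 1
      else cnt)
      = fun (cnt : Int) (k : Nat) => cnt + ((tA n (1 + k) : Nat) : Int) := by
    funext cnt k; exact body_eq n k cnt
  rw [h2, PySem.List.foldl_add]
  rw [show (List.map (fun k => ((tA n (1+k) : Nat) : Int)) (List.range (Nat.sqrt n))).sum
      = (((List.map (fun k => tA n (1+k)) (List.range (Nat.sqrt n))).sum : Nat) : Int) by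
    rw [Nat.cast_list_sum, List.map_map]; rfl]
  rw [zero_add]
  congr 1
  have : (List.map (fun k => tA n (1+k)) (List.range (Nat.sqrt n))).sum
      = ∑ k ∈ Finset.range (Nat.sqrt n), tA n (1+k) := rfl
  rw [this]
  refine (Finset.sum_bij' (i := fun (k : Nat) (_ : k ∈ Finset.range (Nat.sqrt n)) => 1 + k)
      (j := fun (i : Nat) (_ : i ∈ Finset.Icc 1 (Nat.sqrt n)) => i - 1) ?_ ?_ ?_ ?_ ?_)
  · intro a ha; simp at ha ⊢; omega
  · intro a ha; simp at ha ⊢; omega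
  · intro a ha; show 1 + a - 1 = a; omega
  · intro a ha; simp at ha; show 1 + (a - 1) = a; omega
  · intro a ha; rfl

-- the divisor-pair count up to √n is the full divisor count (pair d ↔ n/d)
theorem sum_tA_eq_tau (n : Nat) :
    (Finset.Icc 1 (Nat.sqrt n)).sum (tA n) = n.divisors.card := by
  rcases Nat.eq_zero_or_pos n with h0 | hn
  · subst h0; decide
  classical
  have h1 : (Finset.Icc 1 (Nat.sqrt n)).sum (tA n)
      = ∑ d ∈ n.divisors.filter (fun d => d * d ≤ n), (if d * d = n then 1 else 2) := by
    rw [Finset.sum_congr rfl (fun i _ => tA_eq n i), ← Finset.sum_filter]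
    apply Finset.sum_congr _ (fun _ _ => rfl)
    ext d
    simp only [Finset.mem_filter, Finset.mem_Icc, Nat.mem_divisors]
    constructor
    · rintro ⟨⟨hd1, hd2⟩, hdvd⟩
      exact ⟨⟨hdvd, hn.ne'⟩, Nat.le_sqrt.mp hd2⟩
    · rintro ⟨⟨hdvd, -⟩, hsq⟩
      exact ⟨⟨Nat.pos_of_dvd_of_pos hdvd hn, Nat.le_sqrt.mpr hsq⟩, hdvd⟩
  have h2 : (∑ d ∈ n.divisors.filter (fun d => d * d ≤ n), (if d * d = n then 1 else 2))
      + ((n.divisors.filter (fun d => d * d ≤ n)).filter (fun d => d * d = n)).card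
      = 2 * (n.divisors.filter (fun d => d * d ≤ n)).card := by
    rw [Finset.card_filter, ← Finset.sum_add_distrib]
    have he : ∀ d ∈ n.divisors.filter (fun d => d * d ≤ n),
        ((if d * d = n then 1 else 2) + (if d * d = n then 1 else 0) : Nat) = 2 := by
      intro d _; split_ifs <;> rfl
    rw [Finset.sum_congr rfl he, Finset.sum_const, smul_eq_mul, mul_comm]
  have h3 : (n.divisors.filter (fun d => n ≤ d * d)).card
      = (n.divisors.filter (fun d => d * d ≤ n)).card := by
    apply Finset.card_nbij' (i := fun d => n / d) (j := fun d => n / d)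
    · intro d hd
      simp only [Finset.coe_filter, Set.mem_setOf_eq, Nat.mem_divisors] at hd ⊢
      obtain ⟨⟨hdvd, -⟩, hge⟩ := hd
      have hd0 : 0 < d := Nat.pos_of_dvd_of_pos hdvd hn
      have hmul : d * (n / d) = n := Nat.mul_div_cancel' hdvd
      have hle : n / d ≤ d := Nat.le_of_mul_le_mul_left (by rw [hmul]; exact hge) hd0
      refine ⟨⟨Nat.div_dvd_of_dvd hdvd, hn.ne'⟩, ?_⟩
      calc n / d * (n / d) ≤ n / d * d := Nat.mul_le_mul_left _ hle
        _ = n := by rw [Nat.mul_comm]; exact hmul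
    · intro d hd
      simp only [Finset.coe_filter, Set.mem_setOf_eq, Nat.mem_divisors] at hd ⊢
      obtain ⟨⟨hdvd, -⟩, hle⟩ := hd
      have hd0 : 0 < d := Nat.pos_of_dvd_of_pos hdvd hn
      have hmul : d * (n / d) = n := Nat.mul_div_cancel' hdvd
      have hge : d ≤ n / d :=
        Nat.le_of_mul_le_mul_left (by rw [hmul]; exact hle) hd0
      refine ⟨⟨Nat.div_dvd_of_dvd hdvd, hn.ne'⟩, ?_⟩
      calc n = d * (n / d) := hmul.symm
        _ ≤ n / d * (n / d) := Nat.mul_le_mul_right _ hge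
    · intro d hd
      simp only [Finset.coe_filter, Set.mem_setOf_eq, Nat.mem_divisors] at hd
      exact Nat.div_div_self hd.1.1 hn.ne'
    · intro d hd
      simp only [Finset.coe_filter, Set.mem_setOf_eq, Nat.mem_divisors] at hd
      exact Nat.div_div_self hd.1.1 hn.ne'
  have h4 : (n.divisors.filter (fun d => d * d ≤ n)) ∪ (n.divisors.filter (fun d => n ≤ d * d))
      = n.divisors := by
    ext d
    simp only [Finset.mem_union, Finset.mem_filter]
    rcases Nat.le_total (d * d) n with h | h
    · tauto
    · tauto
  have h5 : (n.divisors.filter (fun d => d * d ≤ n)) ∩ (n.divisors.filter (fun d => n ≤ d * d))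
      = (n.divisors.filter (fun d => d * d ≤ n)).filter (fun d => d * d = n) := by
    ext d
    simp only [Finset.mem_inter, Finset.mem_filter]
    constructor
    · rintro ⟨⟨hm, hle⟩, ⟨-, hge⟩⟩; exact ⟨⟨hm, hle⟩, le_antisymm hle hge⟩
    · rintro ⟨⟨hm, hle⟩, heq⟩; exact ⟨⟨hm, hle⟩, hm, by omega⟩
  have h6 := Finset.card_union_add_card_inter
    (n.divisors.filter (fun d => d * d ≤ n)) (n.divisors.filter (fun d => n ≤ d * d))
  rw [h4, h5] at h6
  rw [h1]
  rw [h3] at h6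
  omega

-- === B-side: the factorization loop computes the divisor count ===

theorem stripF_spec {n : Nat} (p : Nat) (hp : 2 ≤ p) (hn : 0 < n) :
    n = p ^ (stripF n p).2 * (stripF n p).1 ∧ ¬ p ∣ (stripF n p).1 ∧ 0 < (stripF n p).1 := by
  induction n using stripF.induct (p := p) with
  | case1 n h ih =>
      rw [stripF, dif_pos h]
      have hq : 0 < n / p := Nat.div_pos (Nat.le_of_dvd h.2.1 (Nat.dvd_of_mod_eq_zero h.2.2)) (by omega)
      obtain ⟨h1, h2, h3⟩ := ih hq
      refine ⟨?_, h2, h3⟩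
      calc n = n / p * p := (Nat.div_mul_cancel (Nat.dvd_of_mod_eq_zero h.2.2)).symm
        _ = p ^ (stripF (n / p) p).2 * (stripF (n / p) p).1 * p := by rw [← h1]
        _ = p ^ ((stripF (n / p) p).2 + 1) * (stripF (n / p) p).1 := by ring
  | case2 n h =>
      rw [stripF, dif_neg h]
      refine ⟨by simp, fun hdvd => ?_, hn⟩
      exact h ⟨hp, hn, Nat.dvd_iff_mod_eq_zero.mp hdvd⟩

-- a divisor no prime factor undercuts is prime
theorem prime_of_min (p n : Nat) (hp : 2 ≤ p) (hdvd : p ∣ n)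
    (hmin : ∀ q, q.Prime → q ∣ n → p ≤ q) : p.Prime := by
  have hq : p.minFac.Prime := Nat.minFac_prime (by omega)
  have hle : p ≤ p.minFac := hmin _ hq ((Nat.minFac_dvd p).trans hdvd)
  have : p.minFac ≤ p := Nat.minFac_le (by omega)
  have : p.minFac = p := le_antisymm this hle
  rwa [← this]

theorem tau_pow_mul {p m : Nat} (e : Nat) (hp : p.Prime) (hnd : ¬ p ∣ m) :
    (p ^ e * m).divisors.card = (e + 1) * m.divisors.card := by
  have hc : (p ^ e).Coprime m := Nat.Coprime.pow_left e ((Nat.Prime.coprime_iff_not_dvd hp).mpr hnd)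
  rw [Nat.Coprime.card_divisors_mul hc, Nat.divisors_prime_pow hp, Finset.card_map, Finset.card_range]

-- when the loop exits, the remaining cofactor is 1 or prime
theorem small_prime_or_one {n p : Nat} (hlt : n < p * p) (hn : 0 < n)
    (hmin : ∀ q, q.Prime → q ∣ n → p ≤ q) : n = 1 ∨ n.Prime := by
  by_cases h1 : n = 1
  · exact Or.inl h1
  right
  by_contra hnp
  have hsq := Nat.minFac_sq_le_self hn hnp
  have hq : n.minFac.Prime := Nat.minFac_prime h1
  have hle : p ≤ n.minFac := hmin _ hq (Nat.minFac_dvd n)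
  have : p * p ≤ n.minFac * n.minFac := Nat.mul_le_mul hle hle
  have : n.minFac * n.minFac ≤ n := by rw [← pow_two]; exact hsq
  omega

theorem bLoop_spec (n p acc : Nat) (hp : 2 ≤ p) (hn : 0 < n)
    (hmin : ∀ q, q.Prime → q ∣ n → p ≤ q) :
    ((bLoop n p acc).1 = 1 ∨ (bLoop n p acc).1.Prime) ∧
      (bLoop n p acc).2 * (bLoop n p acc).1.divisors.card = acc * n.divisors.card := by
  induction n, p, acc using bLoop.induct with
  | case1 n p acc h hd r ih =>
      rw [bLoop, dif_pos h, dif_pos hd]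
      have hpdvd : p ∣ n := Nat.dvd_of_mod_eq_zero hd
      have hprime : p.Prime := prime_of_min p n h.2 hpdvd hmin
      obtain ⟨heq, hnd, hm⟩ := stripF_spec p h.2 hn
      have hmdvd : (stripF n p).1 ∣ n :=
        ⟨p ^ (stripF n p).2, by (conv_lhs => rw [heq]); exact mul_comm _ _⟩
      have ihm : ∀ q, q.Prime → q ∣ (stripF n p).1 → p + 1 ≤ q := by
        intro q hq hqd
        have hple : p ≤ q := hmin q hq (hqd.trans hmdvd)
        rcases Nat.lt_or_ge p q with h' | h'
        · omega
        · have : q = p := le_antisymm h' hple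
          subst this
          exact absurd hqd hnd
      obtain ⟨hfin, hacc⟩ := ih (by omega) hm ihm
      refine ⟨hfin, ?_⟩
      rw [hacc]
      have : n.divisors.card = ((stripF n p).2 + 1) * (stripF n p).1.divisors.card := by
        conv_lhs => rw [heq]
        exact tau_pow_mul _ hprime hnd
      rw [this]; ring
  | case2 n p acc h hd ih =>
      rw [bLoop, dif_pos h, dif_neg hd]
      have ihm : ∀ q, q.Prime → q ∣ n → p + 1 ≤ q := by
        intro q hq hqd
        have hple : p ≤ q := hmin q hq hqd
        rcases Nat.lt_or_ge p q with h' | h'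
        · omega
        · have : q = p := le_antisymm h' hple
          subst this
          exact absurd (Nat.dvd_iff_mod_eq_zero.mp hqd) hd
      exact ih (by omega) hn ihm
  | case3 n p acc h =>
      rw [bLoop, dif_neg h]
      have hlt : n < p * p := by
        rcases Nat.lt_or_ge n (p * p) with h' | h'
        · exact h'
        · exact absurd ⟨h', hp⟩ h
      exact ⟨small_prime_or_one hlt hn hmin, rfl⟩

-- === assembly ===

theorem cast_beq_four (t : Nat) : (((t : Nat) : Int) == (4 : Int)) = (t == 4) := by
  by_cases h : t = 4
  · subst h; rfl
  · have h1 : ((t : Int) == (4 : Int)) = false := by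
      simp only [beq_eq_false_iff_ne, ne_eq]
      exact_mod_cast h
    have h2 : (t == 4) = false := by simp [h]
    rw [h1, h2]

theorem alt_eq_tau (num : Int) : is_rsa_alt num = (num.toNat.divisors.card == 4) := by
  unfold is_rsa_alt
  by_cases h : num ≤ 1
  · rw [if_pos h]
    have : num.toNat = 0 ∨ num.toNat = 1 := by omega
    rcases this with h0 | h0 <;> rw [h0] <;> decide
  · rw [if_neg h]
    obtain ⟨hfin, hacc⟩ := bLoop_spec num.toNat 2 1 (le_refl 2) (by omega)
      (fun q hq _ => hq.two_le)
    rw [one_mul] at hacc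
    rcases hfin with h1 | hprime
    · have hgt : ¬ (bLoop num.toNat 2 1).1 > 1 := by omega
      rw [h1, Nat.divisors_one, Finset.card_singleton, mul_one] at hacc
      simp only [if_neg hgt, hacc]
    · have hgt : (bLoop num.toNat 2 1).1 > 1 := hprime.one_lt
      rw [hprime.divisors] at hacc
      rw [Finset.card_insert_of_notMem (by simp [hprime.one_lt.ne]), Finset.card_singleton] at hacc
      simp only [if_pos hgt, hacc]

theorem a_eq_tau (num : Int) (h : 0 ≤ num) : is_rsa num = (num.toNat.divisors.card == 4) := by
  have hnum : num = ((num.toNat : Nat) : Int) := by omega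
  conv_lhs => rw [hnum]
  unfold is_rsa
  simp only [Int.toNat_natCast]
  rw [A_cnt_eq_sum num.toNat, sum_tA_eq_tau num.toNat, cast_beq_four]

-- ===== VERDICT (by name: the statement is the Claim_ definition above) =====
theorem is_rsa_spec : Claim_equal_is_rsa := by
  intro num _ hpre
  show is_rsa num = is_rsa_alt num
  rw [a_eq_tau num hpre, alt_eq_tau num]

@[simp] theorem is_rsa_raises : Claim_raises_is_rsa := by
  unfold Claim_raises_is_rsa
  refine ⟨fun num _ hr hp => ?_, by decide⟩
  unfold Raises_is_rsa at hr
  unfold Pre_is_rsa at hp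
  omega
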